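-- pv_equiv track=rewrite | github.com/davidbalazs1993/news_highlights_fetcher | src/news_highlights_fetcher/runner.py | render_report_html
-- ===== SOURCE A (Python) =====
-- def render_report_html(report: str) -> str:
--     lines = report.splitlines()
--     html_lines: list[str] = ["<html>", "<body>"]
--     in_list = False
--     for line in lines:
--         stripped = line.strip()
--         if stripped.startswith("## "):
--             if in_list:
--                 html_lines.append("</ul>")
--                 in_list = False
--             title = stripped.replace("## ", "", 1)
--             html_lines.append(f"<h2>{title}</h2>")
--             continue
--         if stripped.startswith("- "):
--             if not in_list:
--                 html_lines.append("<ul>")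
--                 in_list = True
--             item = stripped.replace("- ", "", 1)
--             html_lines.append(f"<li>{item}</li>")
--             continue
--         if stripped:
--             if in_list:
--                 html_lines.append("</ul>")
--                 in_list = False
--             html_lines.append(f"<p>{stripped}</p>")
--     if in_list:
--         html_lines.append("</ul>")
--     html_lines.extend(["</body>", "</html>"])
--     return "\n".join(html_lines)
-- ===== SOURCE B (Python) =====
-- def render_report_html(report: str) -> str:
--     # classify pass: drop blank lines, tag each remaining stripped line
--     items = []
--     for line in report.splitlines():
--         s = line.strip()
--         if not s:
--             continue
--         if s.startswith("## "):
--             items.append(("h2", s[3:]))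
--         elif s.startswith("- "):
--             items.append(("li", s[2:]))
--         else:
--             items.append(("p", s))
--     # render pass: a maximal run of 'li' items becomes one <ul>...</ul> block
--     out = ["<html>", "<body>"]
--     i, n = 0, len(items)
--     while i < n:
--         kind, text = items[i]
--         if kind == "li":
--             out.append("<ul>")
--             while i < n and items[i][0] == "li":
--                 out.append(f"<li>{items[i][1]}</li>")
--                 i += 1
--             out.append("</ul>")
--         else:
--             out.append(f"<{kind}>{text}</{kind}>")
--             i += 1
--     out.extend(["</body>", "</html>"])
--     return "\n".join(out)
-- ===== Notes on version B (the rewrite author's own statement) =====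
-- stated objective: alternative
-- what changed: Replaced the single stateful loop with an in_list flag by a two-pass pipeline: first classify non-blank stripped lines into (kind, text) items, then render maximal runs of list items as one <ul>..</ul> block via run detection.
import Mathlib
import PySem

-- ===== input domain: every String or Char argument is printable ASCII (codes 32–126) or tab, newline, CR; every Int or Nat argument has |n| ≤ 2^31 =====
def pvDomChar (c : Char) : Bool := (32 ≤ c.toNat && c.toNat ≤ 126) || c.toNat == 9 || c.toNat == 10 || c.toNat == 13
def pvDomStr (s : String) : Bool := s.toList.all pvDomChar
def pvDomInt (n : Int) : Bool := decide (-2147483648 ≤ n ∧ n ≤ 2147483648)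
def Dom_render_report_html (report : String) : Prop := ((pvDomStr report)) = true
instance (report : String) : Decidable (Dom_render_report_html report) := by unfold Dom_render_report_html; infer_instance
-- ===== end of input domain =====

-- B replaces A's single stateful loop (in_list flag) by a classify-then-group pipeline: alternative decomposition, same cost.

-- ===== PORT A =====
-- helper: Python's s.replace(old, new, 1) — replace the FIRST occurrence only (exact for nonempty old)
def replaceOnce : List Char → List Char → List Char → List Char
  | [], _, _ => []
  | c :: rest, old, new =>
      if old.isPrefixOf (c :: rest) then new ++ (c :: rest).drop old.length
      else c :: replaceOnce rest old new

def render_report_html (report : String) : String :=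
  let lines := PySem.Chars.splitlines report.toList
  let st := lines.foldl (fun (st : List (List Char) × Bool) line =>
      let stripped := PySem.Chars.strip line
      if PySem.Chars.startswith stripped "## ".toList then
        let h := if st.2 then st.1 ++ ["</ul>".toList] else st.1
        let title := replaceOnce stripped "## ".toList []
        (h ++ ["<h2>".toList ++ title ++ "</h2>".toList], false)
      else if PySem.Chars.startswith stripped "- ".toList then
        let h := if st.2 = false then st.1 ++ ["<ul>".toList] else st.1
        let item := replaceOnce stripped "- ".toList []
        (h ++ ["<li>".toList ++ item ++ "</li>".toList], true)
      else if stripped ≠ [] then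
        let h := if st.2 then st.1 ++ ["</ul>".toList] else st.1
        (h ++ ["<p>".toList ++ stripped ++ "</p>".toList], false)
      else st)
    (["<html>".toList, "<body>".toList], false)
  let h := if st.2 then st.1 ++ ["</ul>".toList] else st.1
  String.ofList (PySem.Chars.join ['\n'] (h ++ ["</body>".toList, "</html>".toList]))

-- ===== PORT B =====
inductive Kind | h2 | li | p
deriving DecidableEq, Repr

def kindName : Kind → List Char
  | Kind.h2 => ['h', '2']
  | Kind.li => ['l', 'i']
  | Kind.p => ['p']

-- f"<{kind}>{text}</{kind}>"
def renderTag (k : Kind) (t : List Char) : List Char :=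
  ['<'] ++ kindName k ++ ['>'] ++ t ++ ['<', '/'] ++ kindName k ++ ['>']

mutual
  -- B's outer while loop over the classified items
  def renderItems : List (Kind × List Char) → List (List Char)
    | [] => []
    | (k, t) :: r =>
        if k = Kind.li then
          "<ul>".toList :: ("<li>".toList ++ t ++ "</li>".toList) :: consumeRun r
        else renderTag k t :: renderItems r
  termination_by l => (l.length, 0)
  -- B's inner while loop: consume the rest of a run of 'li' items, then close the list
  def consumeRun : List (Kind × List Char) → List (List Char)
    | [] => "</ul>".toList :: renderItems []
    | (k, t) :: r =>
        if k = Kind.li then ("<li>".toList ++ t ++ "</li>".toList) :: consumeRun r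
        else "</ul>".toList :: renderItems ((k, t) :: r)
  termination_by l => (l.length, 1)
end

def render_report_html_alt (report : String) : String :=
  let items := (PySem.Chars.splitlines report.toList).foldl
    (fun (acc : List (Kind × List Char)) line =>
      let s := PySem.Chars.strip line
      if s = [] then acc
      else if PySem.Chars.startswith s "## ".toList then
        acc ++ [(Kind.h2, PySem.Chars.slice s (some 3) none)]
      else if PySem.Chars.startswith s "- ".toList then
        acc ++ [(Kind.li, PySem.Chars.slice s (some 2) none)]
      else acc ++ [(Kind.p, s)]) []
  let out := "<html>".toList :: "<body>".toList :: renderItems items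
  String.ofList (PySem.Chars.join ['\n'] (out ++ ["</body>".toList, "</html>".toList]))

-- ===== PRECONDITION & SPEC =====
def Spec_render_report_html (report : String) (out : String) : Prop := out = render_report_html_alt report
instance (report : String) (out : String) : Decidable (Spec_render_report_html report out) := by unfold Spec_render_report_html; infer_instance

-- ===== CLAIM (what is proved, stated in full; the proofs are below) =====
def Claim_equal_render_report_html : Prop := ∀ (report : String), Dom_render_report_html report → Spec_render_report_html report (render_report_html report)

-- ===== LEMMAS AND PROOFS =====

-- proof-side recursion describing what A's loop emits from flag b onward (including the final </ul>)
def specA : List (List Char) → Bool → List (List Char)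
  | [], b => if b then ["</ul>".toList] else []
  | line :: rest, b =>
      let s := PySem.Chars.strip line
      if PySem.Chars.startswith s "## ".toList then
        (if b then ["</ul>".toList] else []) ++
          ("<h2>".toList ++ replaceOnce s "## ".toList [] ++ "</h2>".toList) :: specA rest false
      else if PySem.Chars.startswith s "- ".toList then
        (if b then [] else ["<ul>".toList]) ++
          ("<li>".toList ++ replaceOnce s "- ".toList [] ++ "</li>".toList) :: specA rest true
      else if s ≠ [] then
        (if b then ["</ul>".toList] else []) ++ ("<p>".toList ++ s ++ "</p>".toList) :: specA rest false
      else specA rest b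

-- proof-side recursion describing B's classification of the lines
def itemsOf : List (List Char) → List (Kind × List Char)
  | [] => []
  | line :: rest =>
      let s := PySem.Chars.strip line
      if PySem.Chars.startswith s "## ".toList then (Kind.h2, s.drop 3) :: itemsOf rest
      else if PySem.Chars.startswith s "- ".toList then (Kind.li, s.drop 2) :: itemsOf rest
      else if s ≠ [] then (Kind.p, s) :: itemsOf rest
      else itemsOf rest

lemma replaceOnce_of_prefix (s old new : List Char) (h : old <+: s) (hne : old ≠ []) :
    replaceOnce s old new = new ++ s.drop old.length := by
  cases s with
  | nil => exact absurd (List.prefix_nil.mp h) hne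
  | cons c rest =>
      unfold replaceOnce
      rw [if_pos (List.isPrefixOf_iff_prefix.mpr h)]

lemma foldA_spec (lines : List (List Char)) :
    ∀ (acc : List (List Char)) (b : Bool),
    (let st := lines.foldl (fun (st : List (List Char) × Bool) line =>
      let stripped := PySem.Chars.strip line
      if PySem.Chars.startswith stripped "## ".toList then
        let h := if st.2 then st.1 ++ ["</ul>".toList] else st.1
        let title := replaceOnce stripped "## ".toList []
        (h ++ ["<h2>".toList ++ title ++ "</h2>".toList], false)
      else if PySem.Chars.startswith stripped "- ".toList then
        let h := if st.2 = false then st.1 ++ ["<ul>".toList] else st.1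
        let item := replaceOnce stripped "- ".toList []
        (h ++ ["<li>".toList ++ item ++ "</li>".toList], true)
      else if stripped ≠ [] then
        let h := if st.2 then st.1 ++ ["</ul>".toList] else st.1
        (h ++ ["<p>".toList ++ stripped ++ "</p>".toList], false)
      else st) (acc, b);
     if st.2 then st.1 ++ ["</ul>".toList] else st.1) = acc ++ specA lines b := by
  induction lines with
  | nil => intro acc b; cases b <;> simp [specA]
  | cons line rest ih =>
      intro acc b
      simp only [List.foldl_cons]
      by_cases h1 : PySem.Chars.startswith (PySem.Chars.strip line) "## ".toList = true
      · simp only [h1, if_true, specA, ih]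
        cases b <;> simp
      · by_cases h2 : PySem.Chars.startswith (PySem.Chars.strip line) "- ".toList = true
        · simp only [h1, h2, if_true, specA, ih]
          cases b <;> simp
        · by_cases h3 : PySem.Chars.strip line = []
          · have e1 : PySem.Chars.startswith ([] : List Char) ['#','#',' '] = false := by decide
            have e2 : PySem.Chars.startswith ([] : List Char) ['-',' '] = false := by decide
            simp only [h1, h2, h3, specA, ih]
            cases b <;> simp [e1, e2]
          · simp only [h1, h2, specA, ih]
            cases b <;> simp [h3]

lemma slice_drop3 (s : List Char) : PySem.List.slice s (some 3) none = s.drop 3 := by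
  rw [PySem.List.slice_from s (by norm_num : (0:Int) ≤ 3)]
  rfl

lemma slice_drop2 (s : List Char) : PySem.List.slice s (some 2) none = s.drop 2 := by
  rw [PySem.List.slice_from s (by norm_num : (0:Int) ≤ 2)]
  rfl

lemma foldB_spec (lines : List (List Char)) :
    ∀ (acc : List (Kind × List Char)),
    lines.foldl (fun (acc : List (Kind × List Char)) line =>
      let s := PySem.Chars.strip line
      if s = [] then acc
      else if PySem.Chars.startswith s "## ".toList then
        acc ++ [(Kind.h2, PySem.Chars.slice s (some 3) none)]
      else if PySem.Chars.startswith s "- ".toList then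
        acc ++ [(Kind.li, PySem.Chars.slice s (some 2) none)]
      else acc ++ [(Kind.p, s)]) acc = acc ++ itemsOf lines := by
  induction lines with
  | nil => intro acc; simp [itemsOf]
  | cons line rest ih =>
      intro acc
      rw [List.foldl_cons, ih]
      by_cases h3 : PySem.Chars.strip line = []
      · have e1 : PySem.Chars.startswith ([] : List Char) ['#','#',' '] = false := by decide
        have e2 : PySem.Chars.startswith ([] : List Char) ['-',' '] = false := by decide
        simp [h3, itemsOf, e1, e2]
      · by_cases h1 : PySem.Chars.startswith (PySem.Chars.strip line) ['#','#',' '] = true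
        · have hs := slice_drop3 (PySem.Chars.strip line)
          simp [h3, h1, itemsOf, hs]
        · by_cases h2 : PySem.Chars.startswith (PySem.Chars.strip line) ['-',' '] = true
          · have hs := slice_drop2 (PySem.Chars.strip line)
            simp [h3, h1, h2, itemsOf, hs]
          · simp [h3, h1, h2, itemsOf]

lemma startswith_drop_h2 (s : List Char)
    (h : PySem.Chars.startswith s ['#','#',' '] = true) :
    replaceOnce s ['#','#',' '] [] = s.drop 3 := by
  have := replaceOnce_of_prefix s ['#','#',' '] []
    ((PySem.Chars.startswith_iff _ _).mp h) (by decide)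
  simpa using this

lemma startswith_drop_li (s : List Char)
    (h : PySem.Chars.startswith s ['-',' '] = true) :
    replaceOnce s ['-',' '] [] = s.drop 2 := by
  have := replaceOnce_of_prefix s ['-',' '] []
    ((PySem.Chars.startswith_iff _ _).mp h) (by decide)
  simpa using this

lemma specA_eq_renderItems (lines : List (List Char)) :
    specA lines false = renderItems (itemsOf lines) ∧
      specA lines true = consumeRun (itemsOf lines) := by
  induction lines with
  | nil => constructor <;> simp [specA, itemsOf, renderItems, consumeRun]
  | cons line rest ih =>
      obtain ⟨ih0, ih1⟩ := ih
      by_cases h1 : PySem.Chars.startswith (PySem.Chars.strip line) ['#','#',' '] = true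
      · have hr := startswith_drop_h2 _ h1
        constructor <;>
          simp [specA, itemsOf, h1, renderItems, consumeRun, renderTag, kindName, hr, ih0]
      · by_cases h2 : PySem.Chars.startswith (PySem.Chars.strip line) ['-',' '] = true
        · have hr := startswith_drop_li _ h2
          constructor <;>
            simp [specA, itemsOf, h1, h2, renderItems, consumeRun, hr, ih1]
        · by_cases h3 : PySem.Chars.strip line = []
          · have e1 : PySem.Chars.startswith ([] : List Char) ['#','#',' '] = false := by decide
            have e2 : PySem.Chars.startswith ([] : List Char) ['-',' '] = false := by decide
            constructor <;> simp [specA, itemsOf, h3, e1, e2, ih0, ih1]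
          · constructor <;>
              simp [specA, itemsOf, h1, h2, h3, renderItems, consumeRun, renderTag,
                kindName, ih0]

-- ===== VERDICT (by name: the statement is the Claim_ definition above) =====
theorem render_report_html_spec : Claim_equal_render_report_html := by
  intro report _
  unfold Spec_render_report_html
  simp only [render_report_html, render_report_html_alt]
  rw [foldA_spec _ _ false, foldB_spec _ []]
  rw [(specA_eq_renderItems (PySem.Chars.splitlines report.toList)).1]
  simp
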